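-- pv_equiv track=rewrite | github.com/hkassow/leet_solutions | alternativeProblems.py | solution
-- ===== SOURCE A (Python) =====
-- def solution(queryType, query):
--     key_offset = 0
--     val_offset = 0
--
--     store = {}
--
--     res = 0
--
--     for i in range(len(query)):
--         code = queryType[i]
--         q = query[i]
--
--         if code == 'insert':
--             store[q[0]-key_offset] = q[1] - val_offset
--         elif code == 'addToValue':
--             val_offset += q[0]
--         elif code == 'addToKey':
--             key_offset += q[0]
--         else:
--             if q[0]-key_offset in store:
--                 res += store[q[0]-key_offset] + val_offset
--     return res
-- ===== SOURCE B (Python) =====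
-- def solution(queryType, query):
--     # phase 1: normalize queries into offset-free events
--     ko = 0
--     vo = 0
--     events = []
--     for code, q in zip(queryType, query):
--         if code == 'insert':
--             events.append(('i', q[0] - ko, q[1] - vo))
--         elif code == 'addToValue':
--             vo += q[0]
--         elif code == 'addToKey':
--             ko += q[0]
--         else:
--             events.append(('g', q[0] - ko, vo))
--     # phase 2: replay the events against a plain dict
--     store = {}
--     res = 0
--     for t, k, v in events:
--         if t == 'i':
--             store[k] = v
--         elif k in store:
--             res += store[k] + v
--     return res
-- ===== Notes on version B (the rewrite author's own statement) =====
-- stated objective: alternative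
-- what changed: B splits A's single stateful loop into two staged passes: pass 1 translates each query into an offset-free event (insert -> real key/value, get -> key plus value correction), pass 2 replays the events against a plain dict that carries no offset arithmetic.
import Mathlib
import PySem

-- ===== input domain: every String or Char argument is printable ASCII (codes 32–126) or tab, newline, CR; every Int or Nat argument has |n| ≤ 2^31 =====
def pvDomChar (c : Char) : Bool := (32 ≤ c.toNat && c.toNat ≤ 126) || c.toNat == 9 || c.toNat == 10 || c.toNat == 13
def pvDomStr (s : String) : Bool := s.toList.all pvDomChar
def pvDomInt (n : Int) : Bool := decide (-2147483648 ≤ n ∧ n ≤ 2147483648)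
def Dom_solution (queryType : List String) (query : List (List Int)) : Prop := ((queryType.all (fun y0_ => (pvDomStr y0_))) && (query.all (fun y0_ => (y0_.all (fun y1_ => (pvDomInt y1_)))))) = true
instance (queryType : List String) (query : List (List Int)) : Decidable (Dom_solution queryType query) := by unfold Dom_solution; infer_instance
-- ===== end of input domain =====

-- B restructures A's single stateful loop into two staged passes (normalize queries into
-- offset-free events, then replay them against a plain dict); objective: alternative decomposition.

-- ===== PORT A =====
-- one iteration of A's loop body, on state (key_offset, val_offset, store, res), fed code = queryType[i], q = query[i]
def solutionStepA (st : Int × Int × PySem.Dict Int Int × Int) (cq : String × List Int) :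
    Int × Int × PySem.Dict Int Int × Int :=
  let (ko, vo, store, res) := st
  let (code, q) := cq
  if code = "insert" then
    (ko, vo, store.insert (PySem.List.pyGetD q 0 0 - ko) (PySem.List.pyGetD q 1 0 - vo), res)
  else if code = "addToValue" then
    (ko, vo + PySem.List.pyGetD q 0 0, store, res)
  else if code = "addToKey" then
    (ko + PySem.List.pyGetD q 0 0, vo, store, res)
  else if store.contains (PySem.List.pyGetD q 0 0 - ko) then
    (ko, vo, store, res + (store.getD (PySem.List.pyGetD q 0 0 - ko) 0 + vo))
  else
    (ko, vo, store, res)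

def solution (queryType : List String) (query : List (List Int)) : Int :=
  -- for i in range(len(query)): … queryType[i] … query[i] …  (in-range accesses under Pre_, so getD defaults are never used)
  ((PySem.List.pyRange 0 (query.length : Int) 1).foldl
      (fun st i => solutionStepA st (PySem.List.pyGetD queryType i "", PySem.List.pyGetD query i []))
      ((0, 0, PySem.Dict.empty, 0) : Int × Int × PySem.Dict Int Int × Int)).2.2.2

-- ===== PORT B =====
-- phase 1 step: state (ko, vo, events); 'insert'/'get' append an offset-free event
def solutionPass1Step (st : Int × Int × List (String × Int × Int)) (cq : String × List Int) :
    Int × Int × List (String × Int × Int) :=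
  let (ko, vo, events) := st
  let (code, q) := cq
  if code = "insert" then
    (ko, vo, events ++ [("i", PySem.List.pyGetD q 0 0 - ko, PySem.List.pyGetD q 1 0 - vo)])
  else if code = "addToValue" then
    (ko, vo + PySem.List.pyGetD q 0 0, events)
  else if code = "addToKey" then
    (ko + PySem.List.pyGetD q 0 0, vo, events)
  else
    (ko, vo, events ++ [("g", PySem.List.pyGetD q 0 0, vo)].map (fun e => (e.1, e.2.1 - ko, e.2.2)))

-- phase 2 step: state (store, res); replay one event, no offsets involved
def solutionPass2Step (st : PySem.Dict Int Int × Int) (e : String × Int × Int) :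
    PySem.Dict Int Int × Int :=
  let (store, res) := st
  let (t, k, v) := e
  if t = "i" then (store.insert k v, res)
  else if store.contains k then (store, res + (store.getD k 0 + v))
  else (store, res)

def solution_alt (queryType : List String) (query : List (List Int)) : Int :=
  let p1 := (queryType.zip query).foldl solutionPass1Step ((0, 0, []) : Int × Int × List (String × Int × Int))
  (p1.2.2.foldl solutionPass2Step ((PySem.Dict.empty, 0) : PySem.Dict Int Int × Int)).2

-- ===== PRECONDITION & SPEC =====
-- Pre_ excludes exactly the inputs on which the Python A raises IndexError: query longer than
-- queryType, or a query row too short for its opcode (2 entries for 'insert', 1 otherwise).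
def Pre_solution (queryType : List String) (query : List (List Int)) : Prop :=
  query.length ≤ queryType.length ∧
  ∀ i, i < query.length →
    (if queryType.getD i "" = "insert" then 2 else 1) ≤ (query.getD i []).length
instance (queryType : List String) (query : List (List Int)) : Decidable (Pre_solution queryType query) := by
  unfold Pre_solution; infer_instance
def pvWitness_solution : List String × List (List Int) :=
  (["insert", "addToKey", "get"], [[1, 2], [3], [4]])

def Spec_solution (queryType : List String) (query : List (List Int)) (out : Int) : Prop := out = solution_alt queryType query
instance (queryType : List String) (query : List (List Int)) (out : Int) : Decidable (Spec_solution queryType query out) := by unfold Spec_solution; infer_instance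

-- ===== CLAIM (what is proved, stated in full; the proofs are below) =====
def Claim_equal_solution : Prop := ∀ (queryType : List String) (query : List (List Int)), Dom_solution queryType query → Pre_solution queryType query → Spec_solution queryType query (solution queryType query)

-- ===== LEMMAS AND PROOFS =====

-- recursive characterisation of the event list built by phase 1
def normRec : List (String × List Int) → Int → Int → List (String × Int × Int)
  | [], _, _ => []
  | (code, q) :: rest, ko, vo =>
    if code = "insert" then
      ("i", PySem.List.pyGetD q 0 0 - ko, PySem.List.pyGetD q 1 0 - vo) :: normRec rest ko vo
    else if code = "addToValue" then normRec rest ko (vo + PySem.List.pyGetD q 0 0)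
    else if code = "addToKey" then normRec rest (ko + PySem.List.pyGetD q 0 0) vo
    else ("g", PySem.List.pyGetD q 0 0 - ko, vo) :: normRec rest ko vo

theorem pass1_events (l : List (String × List Int)) :
    ∀ (ko vo : Int) (acc : List (String × Int × Int)),
      (l.foldl solutionPass1Step (ko, vo, acc)).2.2 = acc ++ normRec l ko vo := by
  induction l with
  | nil => intro ko vo acc; simp [normRec]
  | cons cq rest ih =>
      intro ko vo acc
      obtain ⟨code, q⟩ := cq
      simp only [List.foldl_cons, solutionPass1Step, normRec]
      by_cases h1 : code = "insert"
      · simp [h1, ih]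
      · by_cases h2 : code = "addToValue"
        · simp [h1, h2, ih]
        · by_cases h3 : code = "addToKey"
          · simp [h1, h2, h3, ih]
          · simp [h1, h2, h3, ih]

-- main invariant: A's loop on state (ko, vo, S, res) computes the same res as
-- replaying the normalized events of the remaining queries against (S, res)
theorem loop_eq (l : List (String × List Int)) :
    ∀ (ko vo : Int) (S : PySem.Dict Int Int) (res : Int),
      (l.foldl solutionStepA (ko, vo, S, res)).2.2.2 =
      ((normRec l ko vo).foldl solutionPass2Step (S, res)).2 := by
  induction l with
  | nil => intro ko vo S res; rfl
  | cons cq rest ih =>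
      intro ko vo S res
      obtain ⟨code, q⟩ := cq
      simp only [List.foldl_cons, solutionStepA, normRec]
      by_cases h1 : code = "insert"
      · simp only [h1, if_true, List.foldl_cons, solutionPass2Step]
        simpa using ih ko vo _ res
      · simp only [h1, if_false]
        by_cases h2 : code = "addToValue"
        · simp only [h2, if_true]; exact ih _ _ _ _
        · simp only [h2, if_false]
          by_cases h3 : code = "addToKey"
          · simp only [h3, if_true]; exact ih _ _ _ _
          · simp only [h3, if_false, List.foldl_cons, solutionPass2Step]
            by_cases h4 : S.contains (PySem.List.pyGetD q 0 0 - ko) = true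
            · simp only [h4, if_true, show (("g" : String) = "i") = False by simp, if_false]
              exact ih _ _ _ _
            · simp only [Bool.not_eq_true] at h4
              simp only [h4, Bool.false_eq_true, if_false,
                show (("g" : String) = "i") = False by simp]
              exact ih _ _ _ _

-- bridge: A's fold over range(len(query)) with indexing equals the fold over the zipped lists
theorem foldl_range_zip {α β γ : Type} (f : γ → α × β → γ) (da : α) (db : β) :
    ∀ (ys : List β) (xs : List α), ys.length ≤ xs.length → ∀ (init : γ),
      (List.range ys.length).foldl (fun st i => f st (xs.getD i da, ys.getD i db)) init =
      (xs.zip ys).foldl f init := by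
  intro ys
  induction ys with
  | nil => intro xs _ init; simp
  | cons y ys' ih =>
      intro xs hlen init
      cases xs with
      | nil => simp at hlen
      | cons x xs' =>
          simp only [List.length_cons, List.range_succ_eq_map, List.foldl_cons, List.foldl_map,
            List.zip_cons_cons, List.getD_cons_zero]
          have : ∀ (st : γ) (i : Nat),
              f st ((x :: xs').getD i.succ da, (y :: ys').getD i.succ db) =
              f st (xs'.getD i da, ys'.getD i db) := by
            intro st i; rfl
          simp only [this]
          exact ih xs' (by simpa using hlen) (f init (x, y))

-- ===== VERDICT (by name: the statement is the Claim_ definition above) =====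
theorem solution_spec : Claim_equal_solution := by
  intro queryType query _ hpre
  unfold Spec_solution solution solution_alt
  rw [PySem.List.pyRange_zero_nat, List.foldl_map]
  have hcast : ∀ (st : Int × Int × PySem.Dict Int Int × Int) (i : Nat),
      solutionStepA st (PySem.List.pyGetD queryType ((i : Nat) : Int) "",
        PySem.List.pyGetD query ((i : Nat) : Int) []) =
      solutionStepA st (queryType.getD i "", query.getD i []) := by
    intro st i
    rw [PySem.List.pyGetD_natCast, PySem.List.pyGetD_natCast]
  simp only [hcast]
  rw [foldl_range_zip solutionStepA "" [] query queryType hpre.1]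
  rw [loop_eq (queryType.zip query) 0 0 PySem.Dict.empty 0]
  rw [show ((queryType.zip query).foldl solutionPass1Step
        ((0, 0, []) : Int × Int × List (String × Int × Int))).2.2
      = normRec (queryType.zip query) 0 0 from by
    simpa using pass1_events (queryType.zip query) 0 0 []]
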